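-- pv_equiv track=rewrite | github.com/spyyes/PhraseAnalysis | src/DBLP/task1_active.py | find_active
-- ===== SOURCE A (Python) =====
-- def find_active(a, stat, minsup = 5):
--     '''
--         寻找满足最小支持度要求的一阶项集（也就是作者的集合）
--     '''
--     res = {}
--     for conf in stat["Conference"]:
--         res[conf] = {}
--         for year in stat["year"]:
--             res[conf][year] = []
--     #判断是否满足最小置信度的要求
--     for author in a.keys():
--         for conf in a[author].keys():
--             for year in a[author][conf].keys():
--                 if a[author][conf][year] > minsup:
--                     res[conf][year].append(author)
--
--     return res
-- ===== SOURCE B (Python) =====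
-- def find_active(a, stat, minsup=5):
--     '''Inverted traversal: one nested dict comprehension that, for each
--     (conference, year) cell, rescans the author dict and keeps qualifying authors.'''
--     return {conf: {year: [author for author in a
--                           if conf in a[author]
--                           and year in a[author][conf]
--                           and a[author][conf][year] > minsup]
--                    for year in stat["year"]}
--             for conf in stat["Conference"]}
-- ===== Notes on version B (the rewrite author's own statement) =====
-- stated objective: idiomatic
-- what changed: A pre-initialises a conf*year matrix and makes one forward pass over the author dict, appending each qualifying (author, conf, year) entry into its cell; B inverts the loop nesting into a nested dict comprehension that, for each (conf, year) cell, rescans all authors and keeps those whose count exceeds minsup.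
import Mathlib
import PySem

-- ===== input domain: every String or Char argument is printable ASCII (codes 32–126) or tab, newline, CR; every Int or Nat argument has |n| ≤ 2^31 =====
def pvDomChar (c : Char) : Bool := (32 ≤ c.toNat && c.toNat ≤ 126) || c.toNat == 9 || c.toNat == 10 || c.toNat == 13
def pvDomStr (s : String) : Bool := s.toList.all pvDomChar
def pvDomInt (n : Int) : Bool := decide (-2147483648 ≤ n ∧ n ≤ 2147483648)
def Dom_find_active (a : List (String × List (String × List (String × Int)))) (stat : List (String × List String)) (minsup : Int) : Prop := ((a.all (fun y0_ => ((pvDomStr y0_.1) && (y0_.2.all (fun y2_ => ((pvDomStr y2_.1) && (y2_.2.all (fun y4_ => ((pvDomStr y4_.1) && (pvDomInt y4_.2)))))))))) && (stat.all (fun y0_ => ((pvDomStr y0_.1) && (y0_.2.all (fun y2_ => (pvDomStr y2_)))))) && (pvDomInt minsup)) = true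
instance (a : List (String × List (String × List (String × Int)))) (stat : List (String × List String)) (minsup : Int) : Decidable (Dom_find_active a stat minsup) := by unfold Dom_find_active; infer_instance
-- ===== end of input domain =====

-- B replaces A's pre-initialised matrix plus single forward pass over the author dict by an
-- inverted traversal (a nested dict comprehension rescanning the authors per (conf, year) cell);
-- objective: idiomatic, not faster.

-- ===== PORT A =====
-- A builds res[conf][year] = [] for every conf × year, then a triple loop over the author
-- dict appends each qualifying author into res[conf][year].
def find_active (a : List (String × List (String × List (String × Int)))) (stat : List (String × List String)) (minsup : Int) : List (String × List (String × List String)) :=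
  match (PySem.Dict.mk stat).get? "Conference", (PySem.Dict.mk stat).get? "year" with
  | some confs, some years =>
      -- res = {}; for conf: res[conf] = {}; for year: res[conf][year] = []
      let res0 : PySem.Dict String (PySem.Dict String (List String)) :=
        confs.foldl (fun res conf =>
          years.foldl (fun res year =>
            res.modify conf PySem.Dict.empty (fun inner => inner.insert year []))
            (res.insert conf PySem.Dict.empty)) PySem.Dict.empty
      -- for author in a: for conf in a[author]: for year in a[author][conf]: if > minsup: append
      let res := a.foldl (fun res ap =>
        ap.2.foldl (fun res cp =>
          cp.2.foldl (fun res yp =>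
            if minsup < yp.2 then
              res.modify cp.1 PySem.Dict.empty (fun inner =>
                inner.modify yp.1 [] (fun l => l ++ [ap.1]))
            else res) res) res) res0
      res.items.map (fun p => (p.1, p.2.items))
  | _, _ => []  -- unreachable under Pre_ (Python raises KeyError when stat lacks a key)

-- ===== PORT B =====
-- the innermost list comprehension of Source B: the authors qualifying for one (conf, year) cell
def pvCell (a : List (String × List (String × List (String × Int)))) (minsup : Int) (conf year : String) : List String :=
  (a.filter (fun ap =>
    match (PySem.Dict.mk ap.2).get? conf with
    | some cd =>
        match (PySem.Dict.mk cd).get? year with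
        | some v => decide (minsup < v)
        | none => false
    | none => false)).map (·.1)

def find_active_alt (a : List (String × List (String × List (String × Int)))) (stat : List (String × List String)) (minsup : Int) : List (String × List (String × List String)) :=
  match (PySem.Dict.mk stat).get? "Conference" with
  | none => []  -- unreachable under Pre_
  | some confs =>
    match (PySem.Dict.mk stat).get? "year" with
    | none => []  -- unreachable under Pre_
    | some years =>
      (confs.foldl (fun res conf =>
        res.insert conf (years.foldl (fun inner year =>
          inner.insert year (pvCell a minsup conf year)) PySem.Dict.empty)) PySem.Dict.empty).items.map
        (fun p => (p.1, p.2.items))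

-- ===== PRECONDITION & SPEC =====
-- Pre_ excludes (i) inputs where stat lacks the "Conference" or "year" key, or where some
-- entry above minsup names a conference/year outside stat's lists — on those Python A raises
-- KeyError — and (ii) association lists with duplicate keys inside an author's inner dicts,
-- which encode no Python dict (a Python dict cannot hold duplicate keys).
def Pre_find_active (a : List (String × List (String × List (String × Int)))) (stat : List (String × List String)) (minsup : Int) : Prop :=
  ((PySem.Dict.mk stat).get? "Conference").isSome ∧ ((PySem.Dict.mk stat).get? "year").isSome ∧
  ∀ ap ∈ a, (ap.2.map Prod.fst).Nodup ∧
    ∀ cp ∈ ap.2, (cp.2.map Prod.fst).Nodup ∧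
      ∀ yp ∈ cp.2, minsup < yp.2 →
        cp.1 ∈ (PySem.Dict.mk stat).getD "Conference" [] ∧
        yp.1 ∈ (PySem.Dict.mk stat).getD "year" []
instance (a : List (String × List (String × List (String × Int)))) (stat : List (String × List String)) (minsup : Int) : Decidable (Pre_find_active a stat minsup) := by unfold Pre_find_active; infer_instance

def pvWitness_find_active : (List (String × List (String × List (String × Int)))) × (List (String × List String)) × Int :=
  ([("au", [("C", [("Y", 10)])])], [("Conference", ["C"]), ("year", ["Y"])], 5)

def Spec_find_active (a : List (String × List (String × List (String × Int)))) (stat : List (String × List String)) (minsup : Int) (out : List (String × List (String × List String))) : Prop := out = find_active_alt a stat minsup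
instance (a : List (String × List (String × List (String × Int)))) (stat : List (String × List String)) (minsup : Int) (out : List (String × List (String × List String))) : Decidable (Spec_find_active a stat minsup out) := by unfold Spec_find_active; infer_instance

-- ===== CLAIM (what is proved, stated in full; the proofs are below) =====
def Claim_equal_find_active : Prop := ∀ (a : List (String × List (String × List (String × Int)))) (stat : List (String × List String)) (minsup : Int), Dom_find_active a stat minsup → Pre_find_active a stat minsup → Spec_find_active a stat minsup (find_active a stat minsup)

-- ===== LEMMAS AND PROOFS =====
def pvGuard (minsup : Int) (conf year : String) (ad : List (String × List (String × Int))) : Bool :=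
  match (PySem.Dict.mk ad).get? conf with
  | some cd =>
      match (PySem.Dict.mk cd).get? year with
      | some v => decide (minsup < v)
      | none => false
  | none => false

def pvFold1 (minsup : Int) (author conf : String) (cd : List (String × Int))
    (res : PySem.Dict String (PySem.Dict String (List String))) :
    PySem.Dict String (PySem.Dict String (List String)) :=
  cd.foldl (fun res yp =>
    if minsup < yp.2 then
      res.modify conf PySem.Dict.empty (fun inner => inner.modify yp.1 [] (fun l => l ++ [author]))
    else res) res

def pvFold2 (minsup : Int) (author : String) (ad : List (String × List (String × Int)))
    (res : PySem.Dict String (PySem.Dict String (List String))) :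
    PySem.Dict String (PySem.Dict String (List String)) :=
  ad.foldl (fun res cp => pvFold1 minsup author cp.1 cp.2 res) res

def pvFold3 (minsup : Int) (a : List (String × List (String × List (String × Int))))
    (res : PySem.Dict String (PySem.Dict String (List String))) :
    PySem.Dict String (PySem.Dict String (List String)) :=
  a.foldl (fun res ap => pvFold2 minsup ap.1 ap.2 res) res

theorem pvFold1_cons (minsup : Int) (author conf : String) (y : String) (v : Int)
    (t : List (String × Int)) (res : PySem.Dict String (PySem.Dict String (List String))) :
    pvFold1 minsup author conf ((y, v) :: t) res
      = pvFold1 minsup author conf t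
          (if minsup < v then
            res.modify conf PySem.Dict.empty (fun inner => inner.modify y [] (fun l => l ++ [author]))
          else res) := rfl

theorem pvFold2_cons (minsup : Int) (author c : String) (cd : List (String × Int))
    (t : List (String × List (String × Int))) (res : PySem.Dict String (PySem.Dict String (List String))) :
    pvFold2 minsup author ((c, cd) :: t) res
      = pvFold2 minsup author t (pvFold1 minsup author c cd res) := rfl

theorem pvFold3_cons (minsup : Int) (author : String) (ad : List (String × List (String × Int)))
    (t : List (String × List (String × List (String × Int))))
    (res : PySem.Dict String (PySem.Dict String (List String))) :
    pvFold3 minsup ((author, ad) :: t) res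
      = pvFold3 minsup t (pvFold2 minsup author ad res) := rfl

theorem pv_getD_foldl_insert {β : Type} (g : String → β) (l : List String)
    (d : PySem.Dict String β) (k : String) (dflt : β) :
    (l.foldl (fun d x => d.insert x (g x)) d).getD k dflt
      = if k ∈ l then g k else d.getD k dflt := by
  induction l generalizing d with
  | nil => simp
  | cons x t ih =>
      simp only [List.foldl_cons, ih, List.mem_cons, PySem.Dict.getD_insert]
      by_cases ht : k ∈ t <;> by_cases hx : k = x <;> simp [ht, hx]

theorem pv_fold1_getD_ne (minsup : Int) (author conf : String) (cd : List (String × Int))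
    (res : PySem.Dict String (PySem.Dict String (List String))) (conf' : String) (h : conf' ≠ conf) :
    (pvFold1 minsup author conf cd res).getD conf' PySem.Dict.empty
      = res.getD conf' PySem.Dict.empty := by
  induction cd generalizing res with
  | nil => rfl
  | cons yp t ih =>
      obtain ⟨y, v⟩ := yp
      rw [pvFold1_cons, ih]
      split
      · rw [PySem.Dict.getD_modify_of_ne _ _ _ h]
      · rfl

theorem pv_fold1_cell_not_mem (minsup : Int) (author conf year : String)
    (cd : List (String × Int)) (res : PySem.Dict String (PySem.Dict String (List String)))
    (h : year ∉ cd.map Prod.fst) :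
    ((pvFold1 minsup author conf cd res).getD conf PySem.Dict.empty).getD year []
      = ((res.getD conf PySem.Dict.empty).getD year []) := by
  induction cd generalizing res with
  | nil => rfl
  | cons yp t ih =>
      obtain ⟨y, v⟩ := yp
      simp only [List.map_cons, List.mem_cons, not_or] at h
      rw [pvFold1_cons, ih _ h.2]
      split
      · rw [PySem.Dict.getD_modify_self, PySem.Dict.getD_modify_of_ne _ _ _ h.1]
      · rfl

theorem pv_fold1_cell (minsup : Int) (author conf year : String) (cd : List (String × Int))
    (res : PySem.Dict String (PySem.Dict String (List String)))
    (hnd : (cd.map Prod.fst).Nodup) :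
    ((pvFold1 minsup author conf cd res).getD conf PySem.Dict.empty).getD year []
      = ((res.getD conf PySem.Dict.empty).getD year [])
        ++ (if (match (PySem.Dict.mk cd).get? year with
                | some v => decide (minsup < v)
                | none => false) then [author] else []) := by
  induction cd generalizing res with
  | nil => simp [pvFold1, PySem.Dict.get?]
  | cons yp t ih =>
      obtain ⟨y, v⟩ := yp
      simp only [List.map_cons, List.nodup_cons] at hnd
      rw [pvFold1_cons, PySem.Dict.get?_mk_cons]
      by_cases hy : y = year
      · subst hy
        rw [pv_fold1_cell_not_mem _ _ _ _ _ _ hnd.1]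
        simp only [beq_self_eq_true, if_true]
        by_cases hv : minsup < v
        · simp only [hv, if_true, PySem.Dict.getD_modify_self, PySem.Dict.getD_modify_self]
          simp
        · simp [hv]
      · rw [ih _ hnd.2]
        have hb : (y == year) = false := by simp [hy]
        rw [hb]
        simp only [Bool.false_eq_true, if_false]
        split
        · rw [PySem.Dict.getD_modify_self, PySem.Dict.getD_modify_of_ne _ _ _ (Ne.symm hy)]
        · rfl

theorem pv_fold2_ne (minsup : Int) (author conf : String)
    (ad : List (String × List (String × Int)))
    (res : PySem.Dict String (PySem.Dict String (List String)))
    (h : conf ∉ ad.map Prod.fst) :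
    (pvFold2 minsup author ad res).getD conf PySem.Dict.empty
      = res.getD conf PySem.Dict.empty := by
  induction ad generalizing res with
  | nil => rfl
  | cons cp t ih =>
      obtain ⟨c, cd⟩ := cp
      simp only [List.map_cons, List.mem_cons, not_or] at h
      rw [pvFold2_cons, ih _ h.2, pv_fold1_getD_ne _ _ _ _ _ _ h.1]

theorem pv_fold2_cell (minsup : Int) (author conf year : String)
    (ad : List (String × List (String × Int)))
    (res : PySem.Dict String (PySem.Dict String (List String)))
    (hnd : (ad.map Prod.fst).Nodup)
    (hnd2 : ∀ cp ∈ ad, (cp.2.map Prod.fst).Nodup) :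
    ((pvFold2 minsup author ad res).getD conf PySem.Dict.empty).getD year []
      = ((res.getD conf PySem.Dict.empty).getD year [])
        ++ (if pvGuard minsup conf year ad then [author] else []) := by
  induction ad generalizing res with
  | nil => simp [pvFold2, pvGuard, PySem.Dict.get?]
  | cons cp t ih =>
      obtain ⟨c, cd⟩ := cp
      simp only [List.map_cons, List.nodup_cons] at hnd
      have h2 : ∀ q ∈ t, (q.2.map Prod.fst).Nodup := fun q hq => hnd2 q (List.mem_cons_of_mem _ hq)
      rw [pvFold2_cons]
      by_cases hc : c = conf
      · subst hc
        rw [pv_fold2_ne _ _ _ _ _ hnd.1,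
            pv_fold1_cell _ _ _ _ _ _ (by simpa using hnd2 (c, cd) List.mem_cons_self)]
        simp only [pvGuard, PySem.Dict.get?_mk_cons, beq_self_eq_true, if_true]
      · rw [ih _ hnd.2 h2, pv_fold1_getD_ne _ _ _ _ _ _ (fun h => hc h.symm)]
        have hg : pvGuard minsup conf year ((c, cd) :: t) = pvGuard minsup conf year t := by
          simp only [pvGuard, PySem.Dict.get?_mk_cons]
          have hb : (c == conf) = false := by simp [hc]
          rw [hb]
          simp
        rw [hg]

theorem pv_fold3_cell (minsup : Int) (conf year : String)
    (a : List (String × List (String × List (String × Int))))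
    (res : PySem.Dict String (PySem.Dict String (List String)))
    (hnd : ∀ ap ∈ a, (ap.2.map Prod.fst).Nodup ∧ ∀ cp ∈ ap.2, (cp.2.map Prod.fst).Nodup) :
    ((pvFold3 minsup a res).getD conf PySem.Dict.empty).getD year []
      = ((res.getD conf PySem.Dict.empty).getD year [])
        ++ ((a.filter (fun ap => pvGuard minsup conf year ap.2)).map (·.1)) := by
  induction a generalizing res with
  | nil => simp [pvFold3]
  | cons ap t ih =>
      obtain ⟨author, ad⟩ := ap
      rw [pvFold3_cons, ih _ (fun q hq => hnd q (List.mem_cons_of_mem _ hq)),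
          pv_fold2_cell _ _ _ _ _ _ (by simpa using (hnd (author, ad) List.mem_cons_self).1)
            (by simpa using (hnd (author, ad) List.mem_cons_self).2),
          List.filter_cons]
      by_cases hg : pvGuard minsup conf year ad = true
      · simp only [hg, if_true, List.map_cons, List.append_assoc]
        rfl
      · simp only [Bool.not_eq_true] at hg
        simp [hg]

def pvOK (confs years : List String) (res : PySem.Dict String (PySem.Dict String (List String))) : Prop :=
  res.keys = PySem.Set.ofList confs ∧
  ∀ conf ∈ confs, (res.getD conf PySem.Dict.empty).keys = PySem.Set.ofList years

theorem pv_ok_fold1 (minsup : Int) (author conf : String) (confs years : List String)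
    (cd : List (String × Int)) (res : PySem.Dict String (PySem.Dict String (List String)))
    (hok : pvOK confs years res)
    (hcy : ∀ yp ∈ cd, minsup < yp.2 → conf ∈ confs ∧ yp.1 ∈ years) :
    pvOK confs years (pvFold1 minsup author conf cd res) := by
  induction cd generalizing res with
  | nil => exact hok
  | cons yp t ih =>
      obtain ⟨y, v⟩ := yp
      rw [pvFold1_cons]
      by_cases hv : minsup < v
      · simp only [hv, if_true]
        have hmem := hcy (y, v) List.mem_cons_self hv
        have hcont : res.contains conf = true := by
          rw [PySem.Dict.contains_iff_mem_keys, hok.1, PySem.Set.mem_ofList]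
          exact hmem.1
        refine ih _ ⟨?_, ?_⟩ (fun q hq => hcy q (List.mem_cons_of_mem _ hq))
        · rw [PySem.Dict.keys_modify, PySem.Dict.keys_insert_of_contains _ _ hcont, hok.1]
        · intro c hc
          by_cases hcc : c = conf
          · subst hcc
            rw [PySem.Dict.getD_modify_self]
            have hk := hok.2 c hc
            have hcont2 : (res.getD c PySem.Dict.empty).contains y = true := by
              rw [PySem.Dict.contains_iff_mem_keys, hk, PySem.Set.mem_ofList]
              exact hmem.2
            rw [PySem.Dict.keys_modify, PySem.Dict.keys_insert_of_contains _ _ hcont2, hk]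
          · rw [PySem.Dict.getD_modify_of_ne _ _ _ hcc]
            exact hok.2 c hc
      · simp only [hv, if_false]
        exact ih _ hok (fun q hq => hcy q (List.mem_cons_of_mem _ hq))

theorem pv_ok_fold2 (minsup : Int) (author : String) (confs years : List String)
    (ad : List (String × List (String × Int)))
    (res : PySem.Dict String (PySem.Dict String (List String)))
    (hok : pvOK confs years res)
    (hcy : ∀ cp ∈ ad, ∀ yp ∈ cp.2, minsup < yp.2 → cp.1 ∈ confs ∧ yp.1 ∈ years) :
    pvOK confs years (pvFold2 minsup author ad res) := by
  induction ad generalizing res with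
  | nil => exact hok
  | cons cp t ih =>
      obtain ⟨c, cd⟩ := cp
      rw [pvFold2_cons]
      exact ih _ (pv_ok_fold1 _ _ _ _ _ _ _ hok
          (by simpa using hcy (c, cd) List.mem_cons_self))
        (fun q hq => hcy q (List.mem_cons_of_mem _ hq))

theorem pv_ok_fold3 (minsup : Int) (confs years : List String)
    (a : List (String × List (String × List (String × Int))))
    (res : PySem.Dict String (PySem.Dict String (List String)))
    (hok : pvOK confs years res)
    (hcy : ∀ ap ∈ a, ∀ cp ∈ ap.2, ∀ yp ∈ cp.2, minsup < yp.2 → cp.1 ∈ confs ∧ yp.1 ∈ years) :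
    pvOK confs years (pvFold3 minsup a res) := by
  induction a generalizing res with
  | nil => exact hok
  | cons ap t ih =>
      obtain ⟨author, ad⟩ := ap
      rw [pvFold3_cons]
      exact ih _ (pv_ok_fold2 _ _ _ _ _ _ hok
          (by simpa using hcy (author, ad) List.mem_cons_self))
        (fun q hq => hcy q (List.mem_cons_of_mem _ hq))

-- A's initialisation loop builds each inner dict in place; collapsed to a plain insert
theorem pv_init_inner (years : List String) (conf : String)
    (res : PySem.Dict String (PySem.Dict String (List String)))
    (v : PySem.Dict String (List String)) :
    years.foldl (fun res year =>
        res.modify conf PySem.Dict.empty (fun inner => inner.insert year []))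
        (res.insert conf v)
      = res.insert conf (years.foldl (fun i y => i.insert y []) v) := by
  induction years generalizing v with
  | nil => rfl
  | cons y t ih =>
      simp only [List.foldl_cons]
      have hm : (res.insert conf v).modify conf PySem.Dict.empty
            (fun inner => inner.insert y ([] : List String))
          = res.insert conf (v.insert y []) := by
        simp [PySem.Dict.modify, PySem.Dict.getD_insert_self, PySem.Dict.insert_insert_self]
      rw [hm, ih]

theorem pv_init (confs years : List String) :
    (confs.foldl (fun res conf =>
        years.foldl (fun res year =>
          res.modify conf PySem.Dict.empty (fun inner => inner.insert year []))
          (res.insert conf PySem.Dict.empty)) PySem.Dict.empty)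
      = confs.foldl (fun res conf =>
          res.insert conf (years.foldl (fun i y => i.insert y ([] : List String)) PySem.Dict.empty))
          PySem.Dict.empty := by
  have : (fun (res : PySem.Dict String (PySem.Dict String (List String))) conf =>
        years.foldl (fun res year =>
          res.modify conf PySem.Dict.empty (fun inner => inner.insert year []))
          (res.insert conf PySem.Dict.empty))
      = (fun res conf =>
          res.insert conf (years.foldl (fun i y => i.insert y ([] : List String)) PySem.Dict.empty)) := by
    funext res conf
    exact pv_init_inner years conf res PySem.Dict.empty
  rw [this]

theorem pv_keys_insert_loop {β : Type} (g : String → β) (l : List String) :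
    (l.foldl (fun d x => d.insert x (g x)) (PySem.Dict.empty : PySem.Dict String β)).keys
      = PySem.Set.ofList l := by
  rw [PySem.Dict.keys_foldl_insert l (fun _ x => g x) _]
  simp [PySem.Set.update_nil_left]

theorem pv_nodup_insert_loop {β : Type} (g : String → β) (l : List String) :
    (l.foldl (fun d x => d.insert x (g x)) (PySem.Dict.empty : PySem.Dict String β)).keys.Nodup := by
  exact PySem.Dict.nodup_keys_foldl_insert l (fun _ x => g x) _ (by simp)


theorem pvCell_eq (a : List (String × List (String × List (String × Int)))) (minsup : Int) (conf year : String) :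
    pvCell a minsup conf year = (a.filter (fun ap => pvGuard minsup conf year ap.2)).map (·.1) := rfl

theorem pv_main (a : List (String × List (String × List (String × Int))))
    (minsup : Int) (confs years : List String)
    (hnd : ∀ ap ∈ a, (ap.2.map Prod.fst).Nodup ∧ ∀ cp ∈ ap.2, (cp.2.map Prod.fst).Nodup)
    (hcy : ∀ ap ∈ a, ∀ cp ∈ ap.2, ∀ yp ∈ cp.2, minsup < yp.2 → cp.1 ∈ confs ∧ yp.1 ∈ years) :
    (pvFold3 minsup a
        (confs.foldl (fun res conf =>
          years.foldl (fun res year =>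
            res.modify conf PySem.Dict.empty (fun inner => inner.insert year []))
            (res.insert conf PySem.Dict.empty)) PySem.Dict.empty)).items.map
        (fun p => (p.1, p.2.items))
      = (confs.foldl (fun res conf =>
          res.insert conf (years.foldl (fun inner year =>
            inner.insert year (pvCell a minsup conf year)) PySem.Dict.empty)) PySem.Dict.empty).items.map
        (fun p => (p.1, p.2.items)) := by
  rw [pv_init]
  set inner0 : PySem.Dict String (List String) :=
    years.foldl (fun i y => i.insert y ([] : List String)) PySem.Dict.empty with hinner0
  set resInit := confs.foldl (fun res conf => res.insert conf inner0) PySem.Dict.empty with hresInit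
  have hInitOK : pvOK confs years resInit := by
    constructor
    · exact pv_keys_insert_loop (fun _ => inner0) confs
    · intro conf hc
      rw [hresInit, pv_getD_foldl_insert (fun _ => inner0) confs PySem.Dict.empty conf PySem.Dict.empty]
      simp only [hc, if_true]
      exact pv_keys_insert_loop (fun _ => ([] : List String)) years
  have hAok : pvOK confs years (pvFold3 minsup a resInit) := pv_ok_fold3 _ _ _ _ _ hInitOK hcy
  set resA := pvFold3 minsup a resInit with hresA
  set resB := confs.foldl (fun res conf =>
      res.insert conf (years.foldl (fun inner year =>
        inner.insert year (pvCell a minsup conf year)) PySem.Dict.empty)) PySem.Dict.empty with hresB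
  have hndA : resA.keys.Nodup := by rw [hAok.1]; exact PySem.Set.nodup_ofList confs
  have hndB : resB.keys.Nodup := pv_nodup_insert_loop _ confs
  have hkB : resB.keys = PySem.Set.ofList confs := pv_keys_insert_loop _ confs
  rw [PySem.Dict.items_eq_map_keys resA hndA PySem.Dict.empty,
      PySem.Dict.items_eq_map_keys resB hndB PySem.Dict.empty,
      hAok.1, hkB, List.map_map, List.map_map]
  refine List.map_congr_left (fun conf hconf => ?_)
  have hc : conf ∈ confs := (PySem.Set.mem_ofList confs conf).mp hconf
  simp only [Function.comp]
  -- inner dicts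
  have hBin : resB.getD conf PySem.Dict.empty
      = years.foldl (fun inner year => inner.insert year (pvCell a minsup conf year)) PySem.Dict.empty := by
    rw [hresB, pv_getD_foldl_insert (fun c => years.foldl (fun inner year =>
      inner.insert year (pvCell a minsup c year)) PySem.Dict.empty) confs PySem.Dict.empty conf PySem.Dict.empty]
    simp [hc]
  have hndInA : (resA.getD conf PySem.Dict.empty).keys.Nodup := by
    rw [hAok.2 conf hc]; exact PySem.Set.nodup_ofList years
  have hndInB : (resB.getD conf PySem.Dict.empty).keys.Nodup := by
    rw [hBin]; exact pv_nodup_insert_loop _ years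
  have hkInB : (resB.getD conf PySem.Dict.empty).keys = PySem.Set.ofList years := by
    rw [hBin]; exact pv_keys_insert_loop _ years
  congr 1
  rw [PySem.Dict.items_eq_map_keys _ hndInA ([] : List String),
      PySem.Dict.items_eq_map_keys _ hndInB ([] : List String),
      hAok.2 conf hc, hkInB]
  refine List.map_congr_left (fun year hyear => ?_)
  have hy : year ∈ years := (PySem.Set.mem_ofList years year).mp hyear
  congr 1
  -- A's cell
  have hcellA : (resA.getD conf PySem.Dict.empty).getD year [] = pvCell a minsup conf year := by
    rw [hresA, pv_fold3_cell minsup conf year a resInit hnd, pvCell_eq]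
    have : (resInit.getD conf PySem.Dict.empty).getD year [] = [] := by
      rw [hresInit, pv_getD_foldl_insert (fun _ => inner0) confs PySem.Dict.empty conf PySem.Dict.empty]
      by_cases h : conf ∈ confs
      · simp only [h, if_true, hinner0]
        rw [pv_getD_foldl_insert (fun _ => ([] : List String)) years PySem.Dict.empty year []]
        split <;> rfl
      · simp [h, PySem.Dict.getD_empty]
    rw [this, List.nil_append]
  have hcellB : (resB.getD conf PySem.Dict.empty).getD year [] = pvCell a minsup conf year := by
    rw [hBin, pv_getD_foldl_insert (fun y => pvCell a minsup conf y) years PySem.Dict.empty year []]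
    simp [hy]
  rw [hcellA, hcellB]

-- ===== VERDICT (by name: the statement is the Claim_ definition above) =====
theorem find_active_spec : Claim_equal_find_active := by
  intro a stat minsup _hdom hpre
  obtain ⟨h1, h2, h3⟩ := hpre
  obtain ⟨confs, hc⟩ := Option.isSome_iff_exists.mp h1
  obtain ⟨years, hy⟩ := Option.isSome_iff_exists.mp h2
  have hgc : (PySem.Dict.mk stat).getD "Conference" [] = confs :=
    PySem.Dict.getD_of_get?_eq_some _ _ hc
  have hgy : (PySem.Dict.mk stat).getD "year" [] = years :=
    PySem.Dict.getD_of_get?_eq_some _ _ hy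
  have hnd : ∀ ap ∈ a, (ap.2.map Prod.fst).Nodup ∧ ∀ cp ∈ ap.2, (cp.2.map Prod.fst).Nodup :=
    fun ap hap => ⟨(h3 ap hap).1, fun cp hcp => ((h3 ap hap).2 cp hcp).1⟩
  have hcy : ∀ ap ∈ a, ∀ cp ∈ ap.2, ∀ yp ∈ cp.2, minsup < yp.2 → cp.1 ∈ confs ∧ yp.1 ∈ years := by
    intro ap hap cp hcp yp hyp hv
    have h := ((h3 ap hap).2 cp hcp).2 yp hyp hv
    rw [hgc, hgy] at h
    exact h
  unfold Spec_find_active find_active find_active_alt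
  rw [hc, hy]
  exact pv_main a minsup confs years hnd hcy
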